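-- pv_equiv track=rewrite | github.com/cchrewrite/ambm | ambm_ver_0.2.0/src/python/RepSimpLib.py | ExtractVbleIndexList
-- ===== SOURCE A (Python) =====
-- def ExtractVbleIndexList(VL):
--     VN = []
--     for x in VL:
--         y = x.split("(")
--         if not(y[0] in VN):
--             VN.append(y[0])
--
--     res = []
--     for i in range(len(VN)):
--         P = []
--         for x in VL:
--             y = x.split("(")
--             if y[0] != VN[i]: continue
--             if len(y) == 1: break
--             y = y[1].replace(")","")
--             if not(y in P):
--                 P.append(y)
--         P.sort()
--         res.append([VN[i],P])
--     return res
-- ===== SOURCE B (Python) =====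
-- def ExtractVbleIndexList(VL):
--     # One pass: group by prefix (dict keeps first-occurrence order), per-group
--     # stop flag mirrors A's 'break', a per-group set removes the O(k) list scan.
--     groups = {}
--     for x in VL:
--         y = x.split("(")
--         name = y[0]
--         g = groups.get(name)
--         if g is None:
--             g = [[], set(), False]
--             groups[name] = g
--         if g[2]:
--             continue
--         if len(y) == 1:
--             g[2] = True
--         else:
--             p = y[1].replace(")", "")
--             if p not in g[1]:
--                 g[1].add(p)
--                 g[0].append(p)
--     return [[name, sorted(g[0])] for name, g in groups.items()]
-- ===== Notes on version B (the rewrite author's own statement) =====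
-- stated objective: faster
-- what changed: B replaces A's rescan of the whole input list for every distinct prefix with a single pass that groups by prefix in a dict (per-group stop flag reproducing A's break, per-group set replacing the linear 'in P' scan), then sorts each group's params.
import Mathlib
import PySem

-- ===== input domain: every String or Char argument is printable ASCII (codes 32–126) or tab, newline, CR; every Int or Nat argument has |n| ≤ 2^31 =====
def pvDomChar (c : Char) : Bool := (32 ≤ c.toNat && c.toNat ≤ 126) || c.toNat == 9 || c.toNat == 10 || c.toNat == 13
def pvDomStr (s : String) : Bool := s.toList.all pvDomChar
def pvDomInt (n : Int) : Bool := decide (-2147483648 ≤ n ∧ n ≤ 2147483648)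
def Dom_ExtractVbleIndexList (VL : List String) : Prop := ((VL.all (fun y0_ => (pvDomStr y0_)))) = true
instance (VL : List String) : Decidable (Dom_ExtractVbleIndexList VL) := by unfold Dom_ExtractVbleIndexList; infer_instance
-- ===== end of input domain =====

-- B groups by prefix in ONE pass over VL (dict + per-group stop flag + per-group set),
-- instead of A's rescan of VL for every distinct prefix; return value only, no mutation.

-- x.split("(") — the separator "(" is never empty, so split? always returns a value
def pvSplit (x : String) : List String := (PySem.Str.split? x "(").getD []

-- ===== PORT A =====
-- inner 'for x in VL: …' loop of A, with its 'break' (returns P at the break)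
def pvCollectA (n : String) : List String → List String → List String
  | [], P => P
  | x :: rest, P =>
    if (pvSplit x).headD "" ≠ n then pvCollectA n rest P
    else if (pvSplit x).length = 1 then P
    else
      let p := PySem.Str.replace ((pvSplit x).getD 1 "") ")" ""
      if P.contains p then pvCollectA n rest P
      else pvCollectA n rest (P ++ [p])

def ExtractVbleIndexList (VL : List String) : List (String × List String) :=
  let VN := VL.foldl (fun VN x =>
    if VN.contains ((pvSplit x).headD "") then VN else VN ++ [(pvSplit x).headD ""]) []
  VN.map (fun n => (n, PySem.List.sorted (pvCollectA n VL []) (fun s => s) false))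

-- ===== PORT B =====
-- one step of B's single pass: look the group up (a fresh one if absent), then honour the
-- stop flag / record the stop / add the param if new; stored back in place (Source B mutates g)
def pvStepB (d : PySem.Dict String (List String × PySem.Set String × Bool)) (x : String) :
    PySem.Dict String (List String × PySem.Set String × Bool) :=
  let y := pvSplit x
  let name := y.headD ""
  let g := d.getD name ([], PySem.Set.empty, false)
  let g' :=
    if g.2.2 then g
    else if y.length = 1 then (g.1, g.2.1, true)
    else
      let p := PySem.Str.replace (y.getD 1 "") ")" ""
      if PySem.Set.contains g.2.1 p then g
      else (g.1 ++ [p], PySem.Set.add g.2.1 p, g.2.2)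
  d.insert name g'

def ExtractVbleIndexList_alt (VL : List String) : List (String × List String) :=
  ((VL.foldl pvStepB PySem.Dict.empty).items).map
    (fun kv => (kv.1, PySem.List.sorted kv.2.1 (fun s => s) false))

-- ===== PRECONDITION & SPEC =====
def Spec_ExtractVbleIndexList (VL : List String) (out : List (String × List String)) : Prop := out = ExtractVbleIndexList_alt VL
instance (VL : List String) (out : List (String × List String)) : Decidable (Spec_ExtractVbleIndexList VL out) := by unfold Spec_ExtractVbleIndexList; infer_instance

-- ===== CLAIM (what is proved, stated in full; the proofs are below) =====
def Claim_equal_ExtractVbleIndexList : Prop := ∀ (VL : List String), Dom_ExtractVbleIndexList VL → Spec_ExtractVbleIndexList VL (ExtractVbleIndexList VL)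

-- ===== LEMMAS AND PROOFS =====

-- the prefix of x (what both programs key on)
def pvKey (x : String) : String := (pvSplit x).headD ""

-- what one element x of VL does to the state of the group named n
def pvInner (n : String) (s : List String × List String × Bool) (x : String) :
    List String × List String × Bool :=
  if (pvSplit x).headD "" ≠ n then s
  else if s.2.2 then s
  else if (pvSplit x).length = 1 then (s.1, s.2.1, true)
  else
    let p := PySem.Str.replace ((pvSplit x).getD 1 "") ")" ""
    if PySem.Set.contains s.2.1 p then s
    else (s.1 ++ [p], PySem.Set.add s.2.1 p, s.2.2)

lemma pvInner_ne {n x : String} (h : pvKey x ≠ n) (s : List String × List String × Bool) :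
    pvInner n s x = s := by
  have h' : (pvSplit x).headD "" ≠ n := h
  unfold pvInner
  rw [if_pos h']

lemma pvStepB_eq (d : PySem.Dict String (List String × PySem.Set String × Bool)) (x : String) :
    pvStepB d x =
      d.insert (pvKey x) (pvInner (pvKey x) (d.getD (pvKey x) ([], [], false)) x) := by
  unfold pvStepB pvInner pvKey
  rw [if_neg (fun h => h rfl)]
  rfl

-- the new groups B creates while scanning VL, given the keys ks already present
def pvNews : List String → List String → List (String × (List String × List String × Bool))
  | [], _ => []
  | x :: t, ks =>
    if ks.contains (pvKey x) then pvNews t ks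
    else (pvKey x, t.foldl (pvInner (pvKey x)) (pvInner (pvKey x) ([], [], false) x)) ::
      pvNews t (ks ++ [pvKey x])

-- the new prefixes, in first-occurrence order, given the prefixes ks already seen
def pvNewNames : List String → List String → List String
  | [], _ => []
  | x :: t, ks =>
    if ks.contains (pvKey x) then pvNewNames t ks
    else pvKey x :: pvNewNames t (ks ++ [pvKey x])

lemma not_mem_of_mem_pvNewNames :
    ∀ (t ks : List String) (n : String), n ∈ pvNewNames t ks → n ∉ ks := by
  intro t
  induction t with
  | nil => intro ks n h; simp [pvNewNames] at h
  | cons x t ih =>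
    intro ks n h
    by_cases hc : ks.contains (pvKey x)
    · simp only [pvNewNames, if_pos hc] at h; exact ih ks n h
    · simp only [pvNewNames, if_neg hc] at h
      rcases List.mem_cons.1 h with h | h
      · subst h; simpa using hc
      · have := ih _ _ h; intro hn; exact this (by simp [hn])

-- B's dict after the pass, characterised: old groups are folded through, new ones are pvNews
lemma foldB_items :
    ∀ (VL : List String) (d : PySem.Dict String (List String × PySem.Set String × Bool)),
      d.keys.Nodup →
      (VL.foldl pvStepB d).items =
        d.items.map (fun kv => (kv.1, VL.foldl (pvInner kv.1) kv.2)) ++ pvNews VL d.keys := by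
  intro VL
  induction VL with
  | nil => intro d _; simp [pvNews]
  | cons x t ih =>
    intro d hnd
    rw [List.foldl_cons, pvStepB_eq]
    cases hc : d.contains (pvKey x) with
    | true =>
      have hmemk : pvKey x ∈ d.keys := (PySem.Dict.contains_iff_mem_keys d _).1 hc
      rw [ih _ (by rw [PySem.Dict.keys_insert_of_contains d _ hc]; exact hnd),
        PySem.Dict.keys_insert_of_contains d _ hc,
        PySem.Dict.items_insert_of_contains d _ hc, List.map_map]
      rw [pvNews, if_pos (by simpa using hmemk)]
      congr 1
      apply List.map_congr_left
      intro kv hkv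
      by_cases hk : kv.1 = pvKey x
      · have hgetD : d.getD (pvKey x) ([], [], false) = kv.2 := by
          have hm : (kv.1, kv.2) ∈ d.items := by simpa using hkv
          rw [hk] at hm
          exact PySem.Dict.getD_of_mem_items d hm hnd _
        simp [hk, hgetD]
      · have hbeq : (kv.1 == pvKey x) = false := by simpa using hk
        simp only [Function.comp, hbeq, Bool.false_eq_true, if_false, List.foldl_cons,
          pvInner_ne (fun h => hk h.symm) kv.2]
    | false =>
      have hnk : pvKey x ∉ d.keys := fun h => by
        rw [(PySem.Dict.contains_iff_mem_keys d _).2 h] at hc; cases hc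
      have hnodup2 : (d.keys ++ [pvKey x]).Nodup := by
        simp only [List.nodup_append, List.nodup_singleton, true_and]
        refine ⟨hnd, ?_⟩
        intro a ha b hb h
        exact hnk (((List.mem_singleton.1 hb) ▸ h) ▸ ha)
      rw [ih _ (by rw [PySem.Dict.keys_insert_of_not_contains d _ hc]; exact hnodup2),
        PySem.Dict.keys_insert_of_not_contains d _ hc,
        PySem.Dict.items_insert_of_not_contains d _ hc]
      have hgetD : d.getD (pvKey x) ([], [], false) = ([], [], false) := by
        have h0 : d.get? (pvKey x) = none := by
          rw [PySem.Dict.get?_eq_none_iff_not_mem_keys]; exact hnk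
        simp [PySem.Dict.getD, h0]
      rw [pvNews, if_neg (by simpa using hnk)]
      rw [List.map_append, List.append_assoc]
      congr 1
      · apply List.map_congr_left
        intro kv hkv
        have hk : kv.1 ≠ pvKey x := by
          intro h
          exact hnk (h ▸ PySem.Dict.mem_keys_of_mem_items d hkv)
        simp only [List.foldl_cons, pvInner_ne (fun h => hk h.symm) kv.2]
      · simp [hgetD]

-- pvNews is pvNewNames, each paired with the fold of the WHOLE suffix from the empty state
lemma pvNews_eq :
    ∀ (VL ks : List String),
      pvNews VL ks = (pvNewNames VL ks).map (fun n => (n, VL.foldl (pvInner n) ([], [], false))) := by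
  intro VL
  induction VL with
  | nil => intro ks; simp [pvNews, pvNewNames]
  | cons x t ih =>
    intro ks
    by_cases hc : ks.contains (pvKey x)
    · rw [pvNews, if_pos hc, pvNewNames, if_pos hc, ih]
      apply List.map_congr_left
      intro n hn
      have hne : pvKey x ≠ n := by
        intro h
        exact not_mem_of_mem_pvNewNames t ks n hn (by simpa [← h] using hc)
      simp only [List.foldl_cons, pvInner_ne hne]
    · rw [pvNews, if_neg hc, pvNewNames, if_neg hc, ih]
      simp only [List.map_cons, List.foldl_cons]
      congr 1
      apply List.map_congr_left
      intro n hn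
      have hne : pvKey x ≠ n := by
        intro h
        have := not_mem_of_mem_pvNewNames t (ks ++ [pvKey x]) n hn
        exact this (by simp [h])
      simp only [pvInner_ne hne]

-- A's first loop computes exactly ks ++ pvNewNames
lemma foldA_names :
    ∀ (VL VN : List String),
      VL.foldl (fun VN x =>
        if VN.contains ((pvSplit x).headD "") then VN else VN ++ [(pvSplit x).headD ""]) VN
      = VN ++ pvNewNames VL VN := by
  intro VL
  induction VL with
  | nil => intro VN; simp [pvNewNames]
  | cons x t ih =>
    intro VN
    rw [List.foldl_cons]
    by_cases hc : VN.contains (pvKey x)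
    · rw [pvNewNames, if_pos hc]
      have hc' : VN.contains ((pvSplit x).headD "") = true := hc
      rw [if_pos hc']
      exact ih VN
    · rw [pvNewNames, if_neg hc]
      have hc' : ¬ VN.contains ((pvSplit x).headD "") = true := hc
      rw [if_neg hc']
      rw [ih (VN ++ [(pvSplit x).headD ""]), List.append_assoc]
      rfl

-- a stopped group never changes again
lemma foldInner_stopped :
    ∀ (VL : List String) (n : String) (P S : List String),
      VL.foldl (pvInner n) (P, S, true) = (P, S, true) := by
  intro VL
  induction VL with
  | nil => intros; rfl
  | cons x t ih =>
    intro n P S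
    rw [List.foldl_cons]
    have : pvInner n (P, S, true) x = (P, S, true) := by
      unfold pvInner; split
      · rfl
      · rw [if_pos rfl]
    rw [this]; exact ih n P S

-- A's inner loop (with break) = B's per-group fold (with stop flag), list component;
-- the set component mirrors the param list exactly
lemma collectA_eq :
    ∀ (n : String) (VL P : List String),
      pvCollectA n VL P = (VL.foldl (pvInner n) (P, P, false)).1 := by
  intro n VL
  induction VL with
  | nil => intro P; rfl
  | cons x t ih =>
    intro P
    rw [List.foldl_cons]
    by_cases hk : pvKey x ≠ n
    · have hk' : (pvSplit x).headD "" ≠ n := hk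
      rw [pvInner_ne hk]
      simp only [pvCollectA, if_pos hk']
      exact ih P
    · push_neg at hk
      have hcond : ¬ ((pvSplit x).headD "" ≠ n) := fun h => h hk
      have hk2 : (pvSplit x).head?.getD "" = n := by simpa [pvKey] using hk
      by_cases hl : (pvSplit x).length = 1
      · have hstep : pvInner n (P, P, false) x = (P, P, true) := by
          simp [pvInner, hl, hk2]
        simp only [pvCollectA, if_neg hcond, if_pos hl]
        rw [hstep, foldInner_stopped]
      · cases hm : P.contains (PySem.Str.replace ((pvSplit x).getD 1 "") ")" "") with
        | true =>
          have hm2 : PySem.Str.replace ((pvSplit x)[1]?.getD "") ")" "" ∈ P := by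
            simpa [List.getD] using hm
          have hstep : pvInner n (P, P, false) x = (P, P, false) := by
            simp [pvInner, hl, hk2, hm2, PySem.Set.contains]
          simp only [pvCollectA, if_neg hcond, if_neg hl, hm, if_pos]
          rw [hstep]
          exact ih P
        | false =>
          have hm2 : PySem.Str.replace ((pvSplit x)[1]?.getD "") ")" "" ∉ P := by
            simpa [List.getD] using hm
          have hstep : pvInner n (P, P, false) x =
              (P ++ [PySem.Str.replace ((pvSplit x).getD 1 "") ")" ""],
               P ++ [PySem.Str.replace ((pvSplit x).getD 1 "") ")" ""], false) := by
            simp [pvInner, hl, hk2, hm2, PySem.Set.contains,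
              List.getD]
          simp only [pvCollectA, if_neg hcond, if_neg hl, hm, Bool.false_eq_true, if_false]
          rw [hstep]
          exact ih _

-- ===== VERDICT (by name: the statement is the Claim_ definition above) =====
theorem ExtractVbleIndexList_spec : Claim_equal_ExtractVbleIndexList := by
  intro VL _
  unfold Spec_ExtractVbleIndexList ExtractVbleIndexList ExtractVbleIndexList_alt
  rw [foldB_items VL PySem.Dict.empty (by simp), pvNews_eq]
  have hempty : (PySem.Dict.empty : PySem.Dict String (List String × PySem.Set String × Bool)).items = [] := rfl
  have hkeys : (PySem.Dict.empty : PySem.Dict String (List String × PySem.Set String × Bool)).keys = [] := rfl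
  rw [hempty, hkeys]
  simp only [List.map_nil, List.nil_append, List.map_map]
  rw [foldA_names VL [], List.nil_append]
  apply List.map_congr_left
  intro n _
  simp only [Function.comp, collectA_eq]
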